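-- pv_equiv track=rewrite | github.com/NedelcuRadu/IA | Tema2/main2.py | vecini_din_index
-- ===== SOURCE A (Python) =====
-- class Graph:
--     # coordonatele nodurilor ()
--     noduri = [
--         (2, 0), (3, 0), (4, 0),  # 0   1    2
--         (2, 1), (3, 1), (4, 1),  # 3   4    5
--         (0, 2), (1, 2), (2, 2), (3, 2), (4, 2), (5, 2), (6, 2),  # 6   7    8   9   10  11  12
--         (0, 3), (1, 3), (2, 3), (3, 3), (4, 3), (5, 3), (6, 3),  # 13  14   15  16   17  18  19
--         (0, 4), (1, 4), (2, 4), (3, 4), (4, 4), (5, 4), (6, 4),  # 20  21   22  23   24  25  26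
--         (2, 5), (3, 5), (4, 5),  # 27  28   29
--         (2, 6), (3, 6), (4, 6)  # 30  31   32
--     ]
--     muchii = [(0, 1), (0, 3), (0, 4), (1, 2), (1, 4), (2, 5), (2, 4), (3, 4), (3, 8), (4, 5), (8, 9), (9, 10), (9, 4),
--               (8, 4), (4, 10), (10, 5), (6, 7), (7, 8), (10, 11), (11, 12),
--               (13, 14), (14, 15), (15, 16), (16, 17), (17, 18), (18, 19),
--               (20, 21), (21, 22), (22, 23), (23, 24), (24, 25), (25, 26),
--               (27, 28), (28, 29), (30, 31), (31, 32), (6, 13), (13, 20), (7, 14), (14, 21), (8, 15), (15, 22), (9, 16),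
--               (16, 23), (10, 17), (17, 24), (11, 18), (18, 25), (12, 19), (19, 26),
--               (22, 27), (27, 30), (23, 28), (28, 31), (24, 29), (29, 32), (6, 14), (20, 14), (14, 22), (14, 8), (8, 16),
--               (22, 16), (16, 10), (16, 24), (10, 18), (24, 18), (18, 26), (18, 12),
--               (22, 28), (30, 28), (28, 32), (28, 24)]
--     listaAdiacenta = {0: [1, 3, 4],
--                       1: [0, 2, 4],
--                       2: [1, 5, 4],
--                       3: [0, 4, 8],
--                       4: [0, 1, 2, 3, 5, 9, 8, 10],
--                       5: [2, 4, 10],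
--                       6: [7, 13, 14],
--                       7: [6, 8, 14],
--                       8: [3, 9, 4, 7, 15, 14, 16],
--                       9: [8, 10, 4, 16],
--                       10: [9, 4, 5, 11, 17, 16, 18],
--                       11: [10, 12, 18],
--                       12: [11, 19, 18],
--                       13: [14, 6, 20],
--                       14: [13, 15, 7, 21, 6, 20, 22, 8],
--                       15: [14, 16, 8, 22],
--                       16: [15, 17, 9, 23, 8, 22, 10, 24],
--                       17: [16, 18, 10, 24],
--                       18: [17, 19, 11, 25, 10, 24, 26, 12],
--                       19: [18, 12, 26],
--                       20: [21, 13, 14],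
--                       21: [20, 22, 14],
--                       22: [21, 23, 15, 27, 14, 16, 28],
--                       23: [22, 24, 16, 28],
--                       24: [23, 25, 17, 29, 16, 18, 28],
--                       25: [24, 26, 18],
--                       26: [25, 19, 18],
--                       27: [28, 22, 30],
--                       28: [27, 29, 23, 31, 22, 30, 32, 24],
--                       29: [28, 24, 32],
--                       30: [31, 27, 28],
--                       31: [30, 32, 28],
--                       32: [31, 29, 28]}
--     scalare = 100
--     translatie = 20
--     razaPct = 10
--     razaPiesa = 20
--
-- def vecini_din_index(index_nod):
--     vec = []
--     for (a, b) in Graph.muchii: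
--         if a == index_nod:
--             vec.append(b)
--         if b == index_nod:
--             vec.append(a)
--     return vec
-- ===== SOURCE B (Python) =====
-- class Graph:
--     # coordonatele nodurilor ()
--     noduri = [
--         (2, 0), (3, 0), (4, 0),
--         (2, 1), (3, 1), (4, 1),
--         (0, 2), (1, 2), (2, 2), (3, 2), (4, 2), (5, 2), (6, 2),
--         (0, 3), (1, 3), (2, 3), (3, 3), (4, 3), (5, 3), (6, 3),
--         (0, 4), (1, 4), (2, 4), (3, 4), (4, 4), (5, 4), (6, 4),
--         (2, 5), (3, 5), (4, 5),
--         (2, 6), (3, 6), (4, 6)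
--     ]
--     muchii = [(0, 1), (0, 3), (0, 4), (1, 2), (1, 4), (2, 5), (2, 4), (3, 4), (3, 8), (4, 5), (8, 9), (9, 10), (9, 4),
--               (8, 4), (4, 10), (10, 5), (6, 7), (7, 8), (10, 11), (11, 12),
--               (13, 14), (14, 15), (15, 16), (16, 17), (17, 18), (18, 19),
--               (20, 21), (21, 22), (22, 23), (23, 24), (24, 25), (25, 26),
--               (27, 28), (28, 29), (30, 31), (31, 32), (6, 13), (13, 20), (7, 14), (14, 21), (8, 15), (15, 22), (9, 16),
--               (16, 23), (10, 17), (17, 24), (11, 18), (18, 25), (12, 19), (19, 26),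
--               (22, 27), (27, 30), (23, 28), (28, 31), (24, 29), (29, 32), (6, 14), (20, 14), (14, 22), (14, 8), (8, 16),
--               (22, 16), (16, 10), (16, 24), (10, 18), (24, 18), (18, 26), (18, 12),
--               (22, 28), (30, 28), (28, 32), (28, 24)]
--     listaAdiacenta = {0: [1, 3, 4],
--                       1: [0, 2, 4],
--                       2: [1, 5, 4],
--                       3: [0, 4, 8],
--                       4: [0, 1, 2, 3, 5, 9, 8, 10],
--                       5: [2, 4, 10],
--                       6: [7, 13, 14],
--                       7: [6, 8, 14],
--                       8: [3, 9, 4, 7, 15, 14, 16],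
--                       9: [8, 10, 4, 16],
--                       10: [9, 4, 5, 11, 17, 16, 18],
--                       11: [10, 12, 18],
--                       12: [11, 19, 18],
--                       13: [14, 6, 20],
--                       14: [13, 15, 7, 21, 6, 20, 22, 8],
--                       15: [14, 16, 8, 22],
--                       16: [15, 17, 9, 23, 8, 22, 10, 24],
--                       17: [16, 18, 10, 24],
--                       18: [17, 19, 11, 25, 10, 24, 26, 12],
--                       19: [18, 12, 26],
--                       20: [21, 13, 14],
--                       21: [20, 22, 14],
--                       22: [21, 23, 15, 27, 14, 16, 28],
--                       23: [22, 24, 16, 28],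
--                       24: [23, 25, 17, 29, 16, 18, 28],
--                       25: [24, 26, 18],
--                       26: [25, 19, 18],
--                       27: [28, 22, 30],
--                       28: [27, 29, 23, 31, 22, 30, 32, 24],
--                       29: [28, 24, 32],
--                       30: [31, 27, 28],
--                       31: [30, 32, 28],
--                       32: [31, 29, 28]}
--     scalare = 100
--     translatie = 20
--     razaPct = 10
--     razaPiesa = 20
--
--
-- def vecini_din_index(index_nod):
--     # O(1) table lookup in the precomputed adjacency list instead of scanning muchii;
--     # unknown indices yield a fresh empty list, and the copy keeps the result independently mutable.
--     return list(Graph.listaAdiacenta.get(index_nod, []))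
-- ===== Notes on version B (the rewrite author's own statement) =====
-- stated objective: simpler
-- what changed: B replaces the linear scan over the fixed edge list muchii with a single lookup in the precomputed adjacency table Graph.listaAdiacenta (returning a fresh copy, and an empty list for unknown indices), which stores each node's neighbors in exactly the edge-scan order.
import Mathlib
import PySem

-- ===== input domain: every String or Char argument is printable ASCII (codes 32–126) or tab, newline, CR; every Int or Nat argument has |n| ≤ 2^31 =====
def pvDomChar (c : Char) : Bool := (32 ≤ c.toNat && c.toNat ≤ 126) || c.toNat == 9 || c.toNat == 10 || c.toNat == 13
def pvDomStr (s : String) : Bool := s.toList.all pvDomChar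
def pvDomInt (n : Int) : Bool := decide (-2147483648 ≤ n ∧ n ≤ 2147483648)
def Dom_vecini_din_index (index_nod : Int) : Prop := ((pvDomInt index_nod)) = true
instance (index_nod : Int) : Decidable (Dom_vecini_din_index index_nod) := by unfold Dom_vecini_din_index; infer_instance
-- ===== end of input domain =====

-- B replaces A's scan of the fixed edge list with one lookup in the precomputed adjacency table (objective: simpler).

-- ===== PORT A =====
def pvMuchii : List (Int × Int) := [(0,1), (0,3), (0,4), (1,2), (1,4), (2,5), (2,4), (3,4), (3,8), (4,5), (8,9), (9,10), (9,4), (8,4), (4,10), (10,5), (6,7), (7,8), (10,11), (11,12), (13,14), (14,15), (15,16), (16,17), (17,18), (18,19), (20,21), (21,22), (22,23), (23,24), (24,25), (25,26), (27,28), (28,29), (30,31), (31,32), (6,13), (13,20), (7,14), (14,21), (8,15), (15,22), (9,16), (16,23), (10,17), (17,24), (11,18), (18,25), (12,19), (19,26), (22,27), (27,30), (23,28), (28,31), (24,29), (29,32), (6,14), (20,14), (14,22), (14,8), (8,16), (22,16), (16,10), (16,24), (10,18), (24,18), (18,26), (18,12), (22,28), (30,28), (28,32), (28,24)]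

def vecini_din_index (index_nod : Int) : List Int :=
  pvMuchii.foldl (fun vec p =>
    let vec := if p.1 = index_nod then vec ++ [p.2] else vec
    if p.2 = index_nod then vec ++ [p.1] else vec) []

-- ===== PORT B =====
def pvListaAdiacenta : PySem.Dict Int (List Int) := PySem.Dict.mk [(0,[1,3,4]), (1,[0,2,4]), (2,[1,5,4]), (3,[0,4,8]), (4,[0,1,2,3,5,9,8,10]), (5,[2,4,10]), (6,[7,13,14]), (7,[6,8,14]), (8,[3,9,4,7,15,14,16]), (9,[8,10,4,16]), (10,[9,4,5,11,17,16,18]), (11,[10,12,18]), (12,[11,19,18]), (13,[14,6,20]), (14,[13,15,7,21,6,20,22,8]), (15,[14,16,8,22]), (16,[15,17,9,23,8,22,10,24]), (17,[16,18,10,24]), (18,[17,19,11,25,10,24,26,12]), (19,[18,12,26]), (20,[21,13,14]), (21,[20,22,14]), (22,[21,23,15,27,14,16,28]), (23,[22,24,16,28]), (24,[23,25,17,29,16,18,28]), (25,[24,26,18]), (26,[25,19,18]), (27,[28,22,30]), (28,[27,29,23,31,22,30,32,24]), (29,[28,24,32]), (30,[31,27,28]), (31,[30,32,28]), (32,[3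1,29,28])]

def vecini_din_index_alt (index_nod : Int) : List Int :=
  PySem.Dict.getD pvListaAdiacenta index_nod []

-- ===== PRECONDITION & SPEC =====
def Spec_vecini_din_index (index_nod : Int) (out : List Int) : Prop := out = vecini_din_index_alt index_nod
instance (index_nod : Int) (out : List Int) : Decidable (Spec_vecini_din_index index_nod out) := by unfold Spec_vecini_din_index; infer_instance

-- ===== CLAIM (what is proved, stated in full; the proofs are below) =====
def Claim_equal_vecini_din_index : Prop := ∀ (index_nod : Int), Dom_vecini_din_index index_nod → Spec_vecini_din_index index_nod (vecini_din_index index_nod)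

-- ===== LEMMAS AND PROOFS =====

-- If no edge endpoint equals n, A's fold leaves the accumulator unchanged.
theorem pv_foldl_no_match (n : Int) (l : List (Int × Int)) (acc : List Int)
    (h : ∀ p ∈ l, p.1 ≠ n ∧ p.2 ≠ n) :
    l.foldl (fun vec p =>
      let vec := if p.1 = n then vec ++ [p.2] else vec
      if p.2 = n then vec ++ [p.1] else vec) acc = acc := by
  induction l generalizing acc with
  | nil => rfl
  | cons p t ih =>
    have hp := h p (List.mem_cons_self ..)
    simp only [List.foldl_cons]
    rw [if_neg hp.1, if_neg hp.2, ih _ (fun q hq => h q (List.mem_cons_of_mem _ hq))]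

-- If no key equals n, get? on a literal dict is none.
theorem pv_get?_no_key (n : Int) (l : List (Int × List Int))
    (h : ∀ p ∈ l, p.1 ≠ n) :
    (PySem.Dict.mk l).get? n = none := by
  induction l with
  | nil => rfl
  | cons p t ih =>
    rw [PySem.Dict.get?_mk_cons]
    have hp := h p (List.mem_cons_self ..)
    simp only [beq_iff_eq, if_neg hp]
    exact ih (fun q hq => h q (List.mem_cons_of_mem _ hq))

theorem pv_out_of_range (n : Int) (hn : n < 0 ∨ 32 < n) :
    vecini_din_index n = vecini_din_index_alt n := by
  have hb : ∀ p ∈ pvMuchii, 0 ≤ p.1 ∧ p.1 ≤ 32 ∧ 0 ≤ p.2 ∧ p.2 ≤ 32 := by decide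
  have hk : ∀ p ∈ (PySem.Dict.items pvListaAdiacenta), 0 ≤ p.1 ∧ p.1 ≤ 32 := by decide
  unfold vecini_din_index vecini_din_index_alt
  rw [pv_foldl_no_match n _ _ (fun p hp => by have := hb p hp; constructor <;> omega)]
  rw [PySem.Dict.getD, pv_get?_no_key n _ (fun p hp => by have := hk p hp; omega)]
  rfl

-- ===== VERDICT (by name: the statement is the Claim_ definition above) =====
theorem vecini_din_index_spec : Claim_equal_vecini_din_index := by
  intro n _
  unfold Spec_vecini_din_index
  by_cases h : 0 ≤ n ∧ n ≤ 32
  · obtain ⟨h1, h2⟩ := h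
    interval_cases n <;> decide
  · exact pv_out_of_range n (by omega)
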